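-- pv_equiv track=rewrite | github.com/RohmaShabbir/physical-ai-humanoid-robotics | src/vla_integration/llm_prompt_templates.py | _extract_object_from_command
-- ===== SOURCE A (Python) =====
-- from typing import Dict, Any, Optional, List
--
-- def _extract_object_from_command(command: str, available_objects: List[str]) -> str:
--     """
--     Extract the target object from the command by matching with available objects
--
--     Args:
--         command: The voice command
--         available_objects: List of available objects
--
--     Returns:
--         The best matching object name
--     """
--     command_lower = command.lower()
--
--     # Look for exact matches first
--     for obj in available_objects:
--         if obj.lower() in command_lower:
--             return obj
--
--     # If no exact match, look for partial matches
--     for obj in available_objects: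
--         obj_words = obj.lower().split()
--         for word in obj_words:
--             if word in command_lower:
--                 return obj
--
--     # If still no match, return a default
--     return "unknown_object"
-- ===== SOURCE B (Python) =====
-- def _extract_object_from_command(command, available_objects):
--     command_lower = command.lower()
--     best = None
--     best_obj = None
--     for i, obj in enumerate(available_objects):
--         ol = obj.lower()
--         if ol in command_lower:
--             rank = 0
--         elif any(w in command_lower for w in ol.split()):
--             rank = 1
--         else:
--             continue
--         if best is None or (rank, i) < best:
--             best = (rank, i)
--             best_obj = obj
--     return best_obj if best_obj is not None else "unknown_object"
-- ===== Notes on version B (the rewrite author's own statement) =====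
-- stated objective: alternative
-- what changed: Replaced A's two sequential first-match loops (full-substring pass, then word-match pass) by a single argmin-style pass that ranks each object (0 = full match, 1 = word match) and keeps the minimum (rank, index) candidate.
import Mathlib
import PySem

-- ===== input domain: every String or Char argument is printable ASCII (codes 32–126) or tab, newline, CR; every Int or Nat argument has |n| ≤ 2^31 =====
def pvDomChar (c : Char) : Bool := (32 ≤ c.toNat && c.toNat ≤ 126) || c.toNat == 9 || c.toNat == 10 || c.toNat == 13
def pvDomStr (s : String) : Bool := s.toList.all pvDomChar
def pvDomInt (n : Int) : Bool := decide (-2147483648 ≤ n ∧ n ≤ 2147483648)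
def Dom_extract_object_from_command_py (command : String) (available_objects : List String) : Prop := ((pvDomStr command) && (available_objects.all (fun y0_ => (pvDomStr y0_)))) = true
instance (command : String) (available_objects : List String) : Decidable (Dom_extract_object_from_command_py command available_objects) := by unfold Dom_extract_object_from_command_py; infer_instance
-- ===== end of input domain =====

-- B is an alternative single-pass argmin over (rank, index); equivalence of return values is proved (neither program mutates its arguments).

-- ===== PORT A =====
-- first loop: return the first object whose lowercased name is a substring of the lowercased command
def pyA_loop1 (cl : String) : List String → Option String
  | [] => none
  | obj :: rest =>
    if PySem.Str.isIn (PySem.Str.lower obj) cl then some obj else pyA_loop1 cl rest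

-- second loop: return the first object one of whose lowercased words is a substring
def pyA_loop2 (cl : String) : List String → Option String
  | [] => none
  | obj :: rest =>
    if (PySem.Str.split₀ (PySem.Str.lower obj)).any (fun w => PySem.Str.isIn w cl) then
      some obj
    else pyA_loop2 cl rest

def extract_object_from_command_py (command : String) (available_objects : List String) : String :=
  let command_lower := PySem.Str.lower command
  match pyA_loop1 command_lower available_objects with
  | some obj => obj
  | none =>
    match pyA_loop2 command_lower available_objects with
    | some obj => obj
    | none => "unknown_object"

-- ===== PORT B =====
-- rank 0 = full substring match, rank 1 = some word matches, none = no match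
def pyB_rank? (cl : String) (obj : String) : Option Nat :=
  let ol := PySem.Str.lower obj
  if PySem.Str.isIn ol cl then some 0
  else if (PySem.Str.split₀ ol).any (fun w => PySem.Str.isIn w cl) then some 1
  else none

-- the enumerate loop, carrying the index and the best (rank, index, obj) so far;
-- '(rank, i) < best' decomposed lexicographically
def pyB_go (cl : String) : Nat → Option (Nat × Nat × String) → List String → Option (Nat × Nat × String)
  | _, best, [] => best
  | i, best, obj :: rest =>
    let best' :=
      match pyB_rank? cl obj with
      | none => best
      | some r =>
        match best with
        | none => some (r, i, obj)
        | some (br, bi, bo) =>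
          if r < br ∨ (r = br ∧ i < bi) then some (r, i, obj) else some (br, bi, bo)
    pyB_go cl (i + 1) best' rest

def extract_object_from_command_py_alt (command : String) (available_objects : List String) : String :=
  let command_lower := PySem.Str.lower command
  match pyB_go command_lower 0 none available_objects with
  | some (_, _, o) => o
  | none => "unknown_object"

-- ===== PRECONDITION & SPEC =====
def Spec_extract_object_from_command_py (command : String) (available_objects : List String) (out : String) : Prop := out = extract_object_from_command_py_alt command available_objects
instance (command : String) (available_objects : List String) (out : String) : Decidable (Spec_extract_object_from_command_py command available_objects out) := by unfold Spec_extract_object_from_command_py; infer_instance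

-- ===== CLAIM (what is proved, stated in full; the proofs are below) =====
def Claim_equal_extract_object_from_command_py : Prop := ∀ (command : String) (available_objects : List String), Dom_extract_object_from_command_py command available_objects → Spec_extract_object_from_command_py command available_objects (extract_object_from_command_py command available_objects)

-- ===== LEMMAS AND PROOFS =====

theorem pyB_rank?_full (cl obj : String) (h : PySem.Str.isIn (PySem.Str.lower obj) cl = true) :
    pyB_rank? cl obj = some 0 := by
  simp only [pyB_rank?]; rw [if_pos h]

theorem pyB_rank?_word (cl obj : String) (h : ¬ PySem.Str.isIn (PySem.Str.lower obj) cl = true)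
    (hw : ((PySem.Str.split₀ (PySem.Str.lower obj)).any (fun w => PySem.Str.isIn w cl)) = true) :
    pyB_rank? cl obj = some 1 := by
  simp only [pyB_rank?]; rw [if_neg h, if_pos hw]

theorem pyB_rank?_none (cl obj : String) (h : ¬ PySem.Str.isIn (PySem.Str.lower obj) cl = true)
    (hw : ¬ ((PySem.Str.split₀ (PySem.Str.lower obj)).any (fun w => PySem.Str.isIn w cl)) = true) :
    pyB_rank? cl obj = none := by
  simp only [pyB_rank?]; rw [if_neg h, if_neg hw]

-- a rank-0 best with index below the running index is never displaced
theorem pyB_stay0 (cl : String) (l : List String) : ∀ (i bi : Nat) (bo : String), bi < i →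
    pyB_go cl i (some (0, bi, bo)) l = some (0, bi, bo) := by
  induction l with
  | nil => intro i bi bo _; rfl
  | cons obj rest ih =>
    intro i bi bo h
    simp only [pyB_go]
    cases hr : pyB_rank? cl obj with
    | none => exact ih (i+1) bi bo (by omega)
    | some r =>
      have hn : ¬ (r < 0 ∨ (r = 0 ∧ i < bi)) := by rintro (h' | ⟨-, h'⟩) <;> omega
      show pyB_go cl (i + 1) (if r < 0 ∨ (r = 0 ∧ i < bi) then some (r, i, obj) else some (0, bi, bo)) rest = some (0, bi, bo)
      rw [if_neg hn]
      exact ih (i+1) bi bo (by omega)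

-- with no full match remaining, a rank-1 best with smaller index is never displaced
theorem pyB_stay1 (cl : String) (l : List String) : ∀ (i bi : Nat) (bo : String), bi < i →
    pyA_loop1 cl l = none →
    pyB_go cl i (some (1, bi, bo)) l = some (1, bi, bo) := by
  induction l with
  | nil => intro i bi bo _ _; rfl
  | cons obj rest ih =>
    intro i bi bo h h1
    simp only [pyA_loop1] at h1
    by_cases hfull : PySem.Str.isIn (PySem.Str.lower obj) cl = true
    · rw [if_pos hfull] at h1; cases h1
    · rw [if_neg hfull] at h1
      simp only [pyB_go]
      by_cases hw : ((PySem.Str.split₀ (PySem.Str.lower obj)).any (fun w => PySem.Str.isIn w cl)) = true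
      · have hn : ¬ ((1:Nat) < 1 ∨ (True ∧ i < bi)) := by rintro (h' | ⟨-, h'⟩) <;> omega
        simp only [pyB_rank?_word cl obj hfull hw]
        rw [if_neg hn]
        exact ih (i+1) bi bo (by omega) h1
      · simp only [pyB_rank?_none cl obj hfull hw]
        exact ih (i+1) bi bo (by omega) h1

-- if loop1 hits, the fold from a rank-1 best ends at rank 0 on loop1's object
theorem pyB_hit1 (cl : String) (l : List String) : ∀ (i bi : Nat) (bo o : String), bi < i →
    pyA_loop1 cl l = some o →
    ∃ j, pyB_go cl i (some (1, bi, bo)) l = some (0, j, o) := by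
  induction l with
  | nil => intro i bi bo o _ h; cases h
  | cons obj rest ih =>
    intro i bi bo o h h1
    simp only [pyA_loop1] at h1
    by_cases hfull : PySem.Str.isIn (PySem.Str.lower obj) cl = true
    · rw [if_pos hfull] at h1
      cases h1
      simp only [pyB_go, pyB_rank?_full cl obj hfull]
      rw [if_pos (Or.inl (by omega))]
      exact ⟨i, pyB_stay0 cl rest (i+1) i obj (by omega)⟩
    · rw [if_neg hfull] at h1
      simp only [pyB_go]
      by_cases hw : ((PySem.Str.split₀ (PySem.Str.lower obj)).any (fun w => PySem.Str.isIn w cl)) = true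
      · have hn : ¬ ((1:Nat) < 1 ∨ (True ∧ i < bi)) := by rintro (h' | ⟨-, h'⟩) <;> omega
        simp only [pyB_rank?_word cl obj hfull hw]
        rw [if_neg hn]
        exact ih (i+1) bi bo o (by omega) h1
      · simp only [pyB_rank?_none cl obj hfull hw]
        exact ih (i+1) bi bo o (by omega) h1

-- if loop1 hits, the fold from the empty best ends at rank 0 on loop1's object
theorem pyB_hit0 (cl : String) (l : List String) : ∀ (i : Nat) (o : String),
    pyA_loop1 cl l = some o →
    ∃ j, pyB_go cl i none l = some (0, j, o) := by
  induction l with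
  | nil => intro i o h; cases h
  | cons obj rest ih =>
    intro i o h1
    simp only [pyA_loop1] at h1
    by_cases hfull : PySem.Str.isIn (PySem.Str.lower obj) cl = true
    · rw [if_pos hfull] at h1
      cases h1
      simp only [pyB_go, pyB_rank?_full cl obj hfull]
      exact ⟨i, pyB_stay0 cl rest (i+1) i obj (by omega)⟩
    · rw [if_neg hfull] at h1
      simp only [pyB_go]
      by_cases hw : ((PySem.Str.split₀ (PySem.Str.lower obj)).any (fun w => PySem.Str.isIn w cl)) = true
      · simp only [pyB_rank?_word cl obj hfull hw]
        exact pyB_hit1 cl rest (i+1) i obj o (by omega) h1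
      · simp only [pyB_rank?_none cl obj hfull hw]
        exact ih (i+1) o h1

-- with no full match anywhere, the fold from the empty best realises loop2
theorem pyB_miss (cl : String) (l : List String) : ∀ (i : Nat),
    pyA_loop1 cl l = none →
    (∃ j o, pyA_loop2 cl l = some o ∧ pyB_go cl i none l = some (1, j, o)) ∨
    (pyA_loop2 cl l = none ∧ pyB_go cl i none l = none) := by
  induction l with
  | nil => intro i _; right; exact ⟨rfl, rfl⟩
  | cons obj rest ih =>
    intro i h1
    simp only [pyA_loop1] at h1
    by_cases hfull : PySem.Str.isIn (PySem.Str.lower obj) cl = true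
    · rw [if_pos hfull] at h1; cases h1
    · rw [if_neg hfull] at h1
      simp only [pyB_go, pyA_loop2]
      by_cases hw : ((PySem.Str.split₀ (PySem.Str.lower obj)).any (fun w => PySem.Str.isIn w cl)) = true
      · left
        refine ⟨i, obj, ?_, ?_⟩
        · rw [if_pos hw]
        · simp only [pyB_rank?_word cl obj hfull hw]
          exact pyB_stay1 cl rest (i+1) i obj (by omega) h1
      · simp only [pyB_rank?_none cl obj hfull hw]
        rw [if_neg hw]
        exact ih (i+1) h1

-- ===== VERDICT (by name: the statement is the Claim_ definition above) =====
theorem extract_object_from_command_py_spec : Claim_equal_extract_object_from_command_py := by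
  intro command available_objects _
  unfold Spec_extract_object_from_command_py extract_object_from_command_py extract_object_from_command_py_alt
  cases h1 : pyA_loop1 (PySem.Str.lower command) available_objects with
  | some o =>
    obtain ⟨j, hj⟩ := pyB_hit0 (PySem.Str.lower command) available_objects 0 o h1
    simp only [h1, hj]
  | none =>
    rcases pyB_miss (PySem.Str.lower command) available_objects 0 h1 with ⟨j, o, ho, hg⟩ | ⟨ho, hg⟩ <;>
      simp only [h1, ho, hg]
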